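-- pv_equiv track=rewrite | github.com/semmlerino/spritepal | spritepal/scripts/summarize_rom_trace.py | _longest_contiguous_run
-- ===== SOURCE A (Python) =====
-- def _longest_contiguous_run(addresses: list[int] | set[int]) -> tuple[int | None, int | None, int]:
--     if not addresses:
--         return None, None, 0
--     ordered = sorted(set(addresses))
--     best_start = ordered[0]
--     best_end = ordered[0]
--     best_len = 1
--     run_start = ordered[0]
--     run_end = ordered[0]
--     run_len = 1
--     for addr in ordered[1:]:
--         if addr == run_end + 1:
--             run_end = addr
--             run_len += 1
--         else:
--             if run_len > best_len:
--                 best_start = run_start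
--                 best_end = run_end
--                 best_len = run_len
--             run_start = addr
--             run_end = addr
--             run_len = 1
--     if run_len > best_len:
--         best_start = run_start
--         best_end = run_end
--         best_len = run_len
--     return best_start, best_end, best_len
-- ===== SOURCE B (Python) =====
-- def _longest_contiguous_run(addresses):
--     ordered = sorted(set(addresses))
--     runs = _runs(ordered)
--     if not runs:
--         return None, None, 0
--     best = max(runs, key=len)
--     return best[0], best[-1], len(best)
--
--
-- def _runs(xs):
--     """Split a list into maximal runs of consecutive integers."""
--     runs = []
--     while xs:
--         run = [xs[0]]
--         xs = xs[1:]
--         while xs and xs[0] == run[-1] + 1: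
--             run.append(xs[0])
--             xs = xs[1:]
--         runs.append(run)
--     return runs
-- ===== Notes on version B (the rewrite author's own statement) =====
-- stated objective: alternative
-- what changed: B materializes the sorted distinct addresses into an explicit list of maximal consecutive runs and then selects the first longest run with max(runs, key=len), replacing A's six-variable best/current state machine scan.
import Mathlib
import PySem

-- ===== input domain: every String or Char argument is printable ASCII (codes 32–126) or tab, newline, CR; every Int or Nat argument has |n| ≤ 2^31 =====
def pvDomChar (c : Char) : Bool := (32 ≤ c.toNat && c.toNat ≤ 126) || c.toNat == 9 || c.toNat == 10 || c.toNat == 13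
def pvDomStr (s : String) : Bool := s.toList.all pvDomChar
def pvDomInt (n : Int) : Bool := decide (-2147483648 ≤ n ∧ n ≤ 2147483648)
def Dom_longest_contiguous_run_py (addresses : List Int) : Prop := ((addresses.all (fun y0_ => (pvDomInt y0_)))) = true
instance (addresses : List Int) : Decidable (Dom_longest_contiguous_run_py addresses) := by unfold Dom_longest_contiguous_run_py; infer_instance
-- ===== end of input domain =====

-- B replaces A's six-variable best/current state-machine scan by an explicit list of maximal
-- consecutive runs followed by max-by-length (first longest); alternative decomposition, same cost.

-- ===== PORT A =====
-- A's loop body over 'ordered[1:]' with state (best_start, best_end, best_len, run_start, run_end, run_len)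
def pvAStep (st : Int × Int × Int × Int × Int × Int) (addr : Int) :
    Int × Int × Int × Int × Int × Int :=
  match st with
  | (bs, be, bl, rs, re, rl) =>
    if addr = re + 1 then (bs, be, bl, rs, addr, rl + 1)
    else if rl > bl then (rs, re, rl, addr, addr, 1)
    else (bs, be, bl, addr, addr, 1)

def longest_contiguous_run_py (addresses : List Int) : Option Int × Option Int × Int :=
  if addresses = [] then (none, none, 0)
  else
    match PySem.List.sorted (PySem.Set.ofList addresses) (fun x => x) false with
    | [] => (none, none, 0)  -- unreachable: sorted(set(addresses)) is nonempty since addresses ≠ []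
    | x :: rest =>
      match rest.foldl pvAStep (x, x, 1, x, x, 1) with
      | (bs, be, bl, rs, re, rl) =>
        if rl > bl then (some rs, some re, rl) else (some bs, some be, bl)

-- ===== PORT B =====
-- Source B's inner while loop: consume the maximal consecutive run starting at x, return (run, rest)
def pvTakeRun (x : Int) : List Int → List Int × List Int
  | [] => ([x], [])
  | y :: ys =>
    if y = x + 1 then
      let p := pvTakeRun y ys
      (x :: p.1, p.2)
    else ([x], y :: ys)

-- Source B's _runs: outer while loop, one run per iteration (fuel = length, only termination bookkeeping)
def pvRunsGo : Nat → List Int → List (List Int)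
  | _, [] => []
  | 0, _ :: _ => []  -- unreachable: fuel starts at the list length and never runs out
  | n + 1, x :: xs => (pvTakeRun x xs).1 :: pvRunsGo n (pvTakeRun x xs).2

def pvRunsOf (l : List Int) : List (List Int) := pvRunsGo l.length l

def longest_contiguous_run_py_alt (addresses : List Int) : Option Int × Option Int × Int :=
  let ordered := PySem.List.sorted (PySem.Set.ofList addresses) (fun x => x) false
  match pvRunsOf ordered with
  | [] => (none, none, 0)
  | r :: rest =>
    -- max(runs, key=len): first run of maximal length
    let best := rest.foldl (fun b c => if c.length > b.length then c else b) r
    (best.head?, best.getLast?, (best.length : Int))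

-- ===== PRECONDITION & SPEC =====
def Spec_longest_contiguous_run_py (addresses : List Int) (out : Option Int × Option Int × Int) : Prop := out = longest_contiguous_run_py_alt addresses
instance (addresses : List Int) (out : Option Int × Option Int × Int) : Decidable (Spec_longest_contiguous_run_py addresses out) := by unfold Spec_longest_contiguous_run_py; infer_instance

-- ===== CLAIM (what is proved, stated in full; the proofs are below) =====
def Claim_equal_longest_contiguous_run_py : Prop := ∀ (addresses : List Int), Dom_longest_contiguous_run_py addresses → Spec_longest_contiguous_run_py addresses (longest_contiguous_run_py addresses)

-- ===== LEMMAS AND PROOFS =====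

theorem pvTakeRun_snd_length_le (xs : List Int) : ∀ x : Int, ((pvTakeRun x xs).2).length ≤ xs.length := by
  induction xs with
  | nil => intro x; simp [pvTakeRun]
  | cons y ys ih =>
    intro x
    simp only [pvTakeRun]
    split
    · exact le_trans (ih y) (by simp)
    · simp

-- (start, end, length) summary of a run, and max(·, key=len) on summaries
def pvTriple (r : List Int) : Int × Int × Int := (r.headD 0, r.getLastD 0, (r.length : Int))

def pvPick (b c : Int × Int × Int) : Int × Int × Int := if c.2.2 > b.2.2 then c else b

def pvOut (t : Int × Int × Int) : Option Int × Option Int × Int := (some t.1, some t.2.1, t.2.2)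

def pvFinish (st : Int × Int × Int × Int × Int × Int) : Option Int × Option Int × Int :=
  match st with
  | (bs, be, bl, rs, re, rl) =>
    if rl > bl then (some rs, some re, rl) else (some bs, some be, bl)

theorem pvRunsGo_congr : ∀ (n m : Nat) (l : List Int), l.length ≤ n → l.length ≤ m →
    pvRunsGo n l = pvRunsGo m l := by
  intro n
  induction n with
  | zero =>
    intro m l hn _
    have : l = [] := List.length_eq_zero_iff.mp (Nat.le_zero.mp hn)
    subst this
    cases m <;> rfl
  | succ n ih =>
    intro m l hn hm
    cases l with
    | nil => cases m <;> rfl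
    | cons x xs =>
      cases m with
      | zero => simp at hm
      | succ m =>
        simp only [pvRunsGo]
        have hle := pvTakeRun_snd_length_le xs x
        simp only [List.length_cons] at hn hm
        rw [ih m (pvTakeRun x xs).2 (by omega) (by omega)]

theorem pvRunsOf_cons (x : Int) (xs : List Int) :
    pvRunsOf (x :: xs) = (pvTakeRun x xs).1 :: pvRunsOf (pvTakeRun x xs).2 := by
  simp only [pvRunsOf, List.length_cons, pvRunsGo]
  rw [pvRunsGo_congr xs.length (pvTakeRun x xs).2.length (pvTakeRun x xs).2
        (pvTakeRun_snd_length_le xs x) (le_refl _)]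

theorem pvTakeRun_fst_ne_nil (xs : List Int) (x : Int) : (pvTakeRun x xs).1 ≠ [] := by
  cases xs with
  | nil => simp [pvTakeRun]
  | cons y ys => simp only [pvTakeRun]; split <;> simp

theorem pvTakeRun_head (xs : List Int) : ∀ x : Int, (pvTakeRun x xs).1.headD 0 = x := by
  induction xs with
  | nil => intro x; simp [pvTakeRun]
  | cons y ys ih => intro x; simp only [pvTakeRun]; split <;> simp

theorem pvGetLastD_cons (a : Int) (l : List Int) (h : l ≠ []) :
    (a :: l).getLastD 0 = l.getLastD 0 := by
  cases l with
  | nil => exact absurd rfl h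
  | cons b t => rfl

theorem pvTakeRun_last (xs : List Int) :
    ∀ x : Int, (pvTakeRun x xs).1.getLastD 0 = x + ((pvTakeRun x xs).1.length : Int) - 1 := by
  induction xs with
  | nil => intro x; simp [pvTakeRun]
  | cons y ys ih =>
    intro x
    by_cases hy : y = x + 1
    · have h2 := pvTakeRun_fst_ne_nil ys y
      simp only [pvTakeRun]
      rw [if_pos hy]
      simp only []
      rw [pvGetLastD_cons x _ h2, ih y, List.length_cons]
      push_cast
      omega
    · simp [pvTakeRun, hy]

theorem pvTakeRun_break (xs : List Int) :
    ∀ (x z : Int) (zs : List Int), (pvTakeRun x xs).2 = z :: zs →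
      z ≠ x + ((pvTakeRun x xs).1.length : Int) := by
  induction xs with
  | nil => intro x z zs h; simp [pvTakeRun] at h
  | cons y ys ih =>
    intro x z zs h
    simp only [pvTakeRun] at h ⊢
    by_cases hy : y = x + 1
    · simp only [if_pos hy] at h ⊢
      have := ih y z zs h
      simp only [List.length_cons]
      push_cast
      omega
    · simp only [if_neg hy] at h ⊢
      cases h
      simpa using hy

-- A's fold passes through one maximal run: run_end and run_len advance by (run length - 1)
theorem pvRunPhase (xs : List Int) :
    ∀ (x bs be bl rs0 rl : Int),
      List.foldl pvAStep (bs, be, bl, rs0, x, rl) xs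
        = List.foldl pvAStep
            (bs, be, bl, rs0, x + ((pvTakeRun x xs).1.length : Int) - 1,
              rl + ((pvTakeRun x xs).1.length : Int) - 1)
            (pvTakeRun x xs).2 := by
  induction xs with
  | nil => intro x bs be bl rs0 rl; simp [pvTakeRun]
  | cons y ys ih =>
    intro x bs be bl rs0 rl
    by_cases hy : y = x + 1
    · have e1 : pvTakeRun x (y :: ys) = (x :: (pvTakeRun y ys).1, (pvTakeRun y ys).2) := by
        simp only [pvTakeRun]
        rw [if_pos hy]
      have e2 : pvAStep (bs, be, bl, rs0, x, rl) y = (bs, be, bl, rs0, y, rl + 1) := by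
        simp only [pvAStep]
        rw [if_pos hy]
      rw [List.foldl_cons, e2, ih y bs be bl rs0 (rl + 1), e1]
      simp only [List.length_cons]
      have harith1 : y + ((pvTakeRun y ys).1.length : Int) - 1
          = x + (((pvTakeRun y ys).1.length + 1 : Nat) : Int) - 1 := by push_cast; omega
      have harith2 : rl + 1 + ((pvTakeRun y ys).1.length : Int) - 1
          = rl + (((pvTakeRun y ys).1.length + 1 : Nat) : Int) - 1 := by push_cast; omega
      rw [harith1, harith2]
    · have e1 : pvTakeRun x (y :: ys) = ([x], y :: ys) := by
        simp only [pvTakeRun]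
        rw [if_neg hy]
      rw [e1]
      norm_num

-- Main invariant: A's finish of the fold started at a fresh run equals picking through the runs,
-- given any incoming best triple t
theorem pvMain : ∀ (n : Nat) (xs : List Int), xs.length ≤ n →
    ∀ (x : Int) (t : Int × Int × Int),
      pvFinish (List.foldl pvAStep (t.1, t.2.1, t.2.2, x, x, 1) xs)
        = pvOut (((pvRunsOf (x :: xs)).map pvTriple).foldl pvPick t) := by
  intro n
  induction n with
  | zero =>
    intro xs hxs x t
    have hnil : xs = [] := List.length_eq_zero_iff.mp (Nat.le_zero.mp hxs)
    subst hnil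
    rcases t with ⟨bs, be, bl⟩
    rw [pvRunsOf_cons]
    simp only [pvTakeRun, pvRunsOf, pvRunsGo, List.length_nil, List.map_cons, List.map_nil,
      List.foldl_cons, List.foldl_nil, pvFinish, pvOut, pvPick, pvTriple]
    norm_num
    by_cases h : (1 : Int) > bl <;> simp [h]
  | succ n ih =>
    intro xs hxs x t
    rcases t with ⟨bs, be, bl⟩
    rw [pvRunPhase xs x bs be bl x 1]
    have htrip : pvTriple (pvTakeRun x xs).1
        = (x, x + ((pvTakeRun x xs).1.length : Int) - 1, ((pvTakeRun x xs).1.length : Int)) := by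
      simp only [pvTriple]
      rw [pvTakeRun_head, pvTakeRun_last]
    have hlen : 0 < (pvTakeRun x xs).1.length :=
      List.length_pos_of_ne_nil (pvTakeRun_fst_ne_nil xs x)
    have hone : (1 : Int) + ((pvTakeRun x xs).1.length : Int) - 1
        = ((pvTakeRun x xs).1.length : Int) := by omega
    rw [pvRunsOf_cons]
    simp only [List.map_cons, List.foldl_cons]
    rw [hone]
    cases hrest : (pvTakeRun x xs).2 with
    | nil =>
      simp only [pvRunsOf, pvRunsGo, List.length_nil, List.map_nil, List.foldl_nil, List.foldl_nil,
        pvFinish, pvOut]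
      rw [htrip]
      simp only [pvPick]
      by_cases h : ((pvTakeRun x xs).1.length : Int) > bl <;> simp [h]
    | cons z zs =>
      have hz : z ≠ x + ((pvTakeRun x xs).1.length : Int) - 1 + 1 := by
        have := pvTakeRun_break xs x z zs hrest
        omega
      have hzs : zs.length ≤ n := by
        have h1 := pvTakeRun_snd_length_le xs x
        rw [hrest] at h1
        simp only [List.length_cons] at h1
        omega
      rw [htrip]
      by_cases h : ((pvTakeRun x xs).1.length : Int) > bl
      · have estep : pvAStep (bs, be, bl, x, x + ((pvTakeRun x xs).1.length : Int) - 1,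
              ((pvTakeRun x xs).1.length : Int)) z
            = (x, x + ((pvTakeRun x xs).1.length : Int) - 1, ((pvTakeRun x xs).1.length : Int),
                z, z, 1) := by
          simp only [pvAStep]
          rw [if_neg hz, if_pos h]
        rw [List.foldl_cons, estep]
        have hih := ih zs hzs z
          (x, x + ((pvTakeRun x xs).1.length : Int) - 1, ((pvTakeRun x xs).1.length : Int))
        simp only at hih
        rw [hih, pvRunsOf_cons]
        simp only [pvPick]
        rw [if_pos h]
      · have estep : pvAStep (bs, be, bl, x, x + ((pvTakeRun x xs).1.length : Int) - 1,
              ((pvTakeRun x xs).1.length : Int)) z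
            = (bs, be, bl, z, z, 1) := by
          simp only [pvAStep]
          rw [if_neg hz, if_neg h]
        rw [List.foldl_cons, estep]
        have hih := ih zs hzs z (bs, be, bl)
        simp only at hih
        rw [hih, pvRunsOf_cons]
        simp only [pvPick]
        rw [if_neg h]

-- max(runs, key=len) commutes with taking (start, end, length) summaries
theorem pvFoldTriple (rs : List (List Int)) :
    ∀ r : List Int,
      pvTriple (rs.foldl (fun b c => if c.length > b.length then c else b) r)
        = (rs.map pvTriple).foldl pvPick (pvTriple r) := by
  induction rs with
  | nil => intro r; simp
  | cons c cs ih =>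
    intro r
    simp only [List.foldl_cons, List.map_cons]
    rw [ih]
    congr 1
    simp only [pvPick, pvTriple]
    by_cases h : c.length > r.length
    · rw [if_pos h, if_pos (by exact_mod_cast h)]
    · rw [if_neg h, if_neg (by exact_mod_cast h)]

-- the fold result is the initial run or one of the listed runs
theorem pvFoldMem (rs : List (List Int)) :
    ∀ r : List Int,
      rs.foldl (fun b c => if c.length > b.length then c else b) r = r ∨
        rs.foldl (fun b c => if c.length > b.length then c else b) r ∈ rs := by
  induction rs with
  | nil => intro r; left; rfl
  | cons c cs ih =>
    intro r
    simp only [List.foldl_cons]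
    by_cases h : c.length > r.length
    · rw [if_pos h]
      rcases ih c with h1 | h1
      · right; rw [h1]; simp
      · right; simp [h1]
    · rw [if_neg h]
      rcases ih r with h1 | h1
      · left; exact h1
      · right; simp [h1]

theorem pvRunsGo_ne_nil : ∀ (n : Nat) (l : List Int), ∀ r ∈ pvRunsGo n l, r ≠ [] := by
  intro n
  induction n with
  | zero => intro l r hr; cases l <;> simp [pvRunsGo] at hr
  | succ n ih =>
    intro l r hr
    cases l with
    | nil => simp [pvRunsGo] at hr
    | cons x xs =>
      simp only [pvRunsGo, List.mem_cons] at hr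
      rcases hr with h | h
      · rw [h]; exact pvTakeRun_fst_ne_nil xs x
      · exact ih _ r h

theorem pvRunsOf_ne_nil (l : List Int) : ∀ r ∈ pvRunsOf l, r ≠ [] :=
  pvRunsGo_ne_nil l.length l

-- first-run seeding: A's initial best (x, x, 1) is absorbed by the first run's summary
theorem pvPickFirst (xs : List Int) (x : Int) :
    pvPick (x, x, 1) (pvTriple (pvTakeRun x xs).1) = pvTriple (pvTakeRun x xs).1 := by
  have hlen : 0 < (pvTakeRun x xs).1.length :=
    List.length_pos_of_ne_nil (pvTakeRun_fst_ne_nil xs x)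
  simp only [pvPick, pvTriple, pvTakeRun_head, pvTakeRun_last]
  by_cases h : ((pvTakeRun x xs).1.length : Int) > 1
  · rw [if_pos h]
  · rw [if_neg h]
    have : (pvTakeRun x xs).1.length = 1 := by omega
    rw [this]
    norm_num

theorem pvHead?_eq (l : List Int) (h : l ≠ []) : l.head? = some (l.headD 0) := by
  cases l with
  | nil => exact absurd rfl h
  | cons a t => rfl

theorem pvGetLast?_eq (l : List Int) (h : l ≠ []) : l.getLast? = some (l.getLastD 0) := by
  rw [List.getLastD_eq_getLast?]
  cases hl : l.getLast? with
  | none => exact absurd (List.getLast?_eq_none_iff.mp hl) h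
  | some a => rfl

theorem pvFinish_proj (st : Int × Int × Int × Int × Int × Int) :
    (if st.2.2.2.2.2 > st.2.2.1
      then ((some st.2.2.2.1 : Option Int), (some st.2.2.2.2.1 : Option Int), st.2.2.2.2.2)
      else (some st.1, some st.2.1, st.2.2.1)) = pvFinish st := by
  rcases st with ⟨a, b, c, d, e, f⟩
  rfl

-- ===== VERDICT (by name: the statement is the Claim_ definition above) =====
theorem longest_contiguous_run_py_spec : Claim_equal_longest_contiguous_run_py := by
  intro addresses _
  unfold Spec_longest_contiguous_run_py
  unfold longest_contiguous_run_py longest_contiguous_run_py_alt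
  by_cases hemp : addresses = []
  · subst hemp
    decide
  · rw [if_neg hemp]
    have hord : PySem.List.sorted (PySem.Set.ofList addresses) (fun x => x) false ≠ [] := by
      intro h
      rw [PySem.List.sorted_eq_nil_iff] at h
      rcases addresses with _ | ⟨a, tl⟩
      · exact hemp rfl
      · have : a ∈ PySem.Set.ofList (a :: tl) := by
          rw [PySem.Set.mem_ofList]; simp
        rw [h] at this; simp at this
    cases hs : PySem.List.sorted (PySem.Set.ofList addresses) (fun x => x) false with
    | nil => exact absurd hs hord
    | cons x xs =>
      simp only
      have hmain := pvMain xs.length xs (le_refl _) x (x, x, 1)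
      simp only at hmain
      rw [pvFinish_proj, hmain, pvRunsOf_cons]
      -- unfold the runs of x :: xs on the B side
      simp only [List.map_cons, List.foldl_cons, pvPickFirst]
      rw [← pvFoldTriple]
      set best := ((pvRunsOf (pvTakeRun x xs).2).foldl
        (fun b c => if c.length > b.length then c else b) (pvTakeRun x xs).1) with hbest
      have hbne : best ≠ [] := by
        rcases pvFoldMem (pvRunsOf (pvTakeRun x xs).2) (pvTakeRun x xs).1 with h | h
        · rw [hbest, h]; exact pvTakeRun_fst_ne_nil xs x
        · exact pvRunsOf_ne_nil _ best h
      simp only [pvOut, pvTriple, pvHead?_eq best hbne, pvGetLast?_eq best hbne]
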